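-- pv_equiv track=rewrite | github.com/fundestpuente/SIC-Family-Armony-Ai-Sistema-de-recomendacion-para-viajes-familiares-segun-preferencias-individuales | frontend/utils/helpers.py | render_stars
-- ===== SOURCE A (Python) =====
-- def render_stars(rating):
--     """Renderiza estrellas visualmente"""
--     stars = ""
--     for i in range(5):
--         if i < rating:
--             stars += "★"
--         else:
--             stars += "☆"
--     return stars
-- ===== SOURCE B (Python) =====
-- def render_stars(rating):
--     n = max(0, min(5, rating))
--     return "\u2605" * n + "\u2606" * (5 - n)
-- ===== Notes on version B (the rewrite author's own statement) =====
-- stated objective: simpler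
-- what changed: Replaces the per-iteration loop that appends one star at a time with a closed-form clamp of the rating to [0,5] followed by string replication.
import Mathlib
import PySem

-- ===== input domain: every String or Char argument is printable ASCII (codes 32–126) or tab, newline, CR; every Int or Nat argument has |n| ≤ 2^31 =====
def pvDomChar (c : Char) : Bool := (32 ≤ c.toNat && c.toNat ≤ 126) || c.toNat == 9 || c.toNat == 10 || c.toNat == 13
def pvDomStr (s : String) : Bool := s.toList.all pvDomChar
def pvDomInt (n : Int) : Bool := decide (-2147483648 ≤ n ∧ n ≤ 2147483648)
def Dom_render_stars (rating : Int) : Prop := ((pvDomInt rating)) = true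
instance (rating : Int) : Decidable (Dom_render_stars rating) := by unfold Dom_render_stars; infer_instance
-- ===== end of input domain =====

-- B replaces A's append-per-iteration loop by clamping the rating to [0,5] and replicating each star character (simpler decomposition).


-- ===== PORT A =====
def render_stars (rating : Int) : String :=
  (PySem.List.pyRange 0 5 1).foldl
    (fun stars i => stars ++ (if i < rating then "★" else "☆")) ""

-- ===== PORT B =====
def render_stars_alt (rating : Int) : String :=
  let n : Int := max 0 (min 5 rating)
  String.mk (List.replicate n.toNat '★' ++ List.replicate (5 - n).toNat '☆')

-- ===== PRECONDITION & SPEC =====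
def Spec_render_stars (rating : Int) (out : String) : Prop := out = render_stars_alt rating
instance (rating : Int) (out : String) : Decidable (Spec_render_stars rating out) := by unfold Spec_render_stars; infer_instance

-- ===== CLAIM (what is proved, stated in full; the proofs are below) =====
def Claim_equal_render_stars : Prop := ∀ (rating : Int), Dom_render_stars rating → Spec_render_stars rating (render_stars rating)

-- ===== LEMMAS AND PROOFS =====

theorem render_stars_eq_alt (r : Int) : render_stars r = render_stars_alt r := by
  have hR : PySem.List.pyRange 0 5 1 = [0, 1, 2, 3, 4] := by decide
  by_cases h0 : r ≤ 0
  · have hn : max 0 (min 5 r) = 0 := by omega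
    simp [render_stars, render_stars_alt, hR, hn,
      show ¬((0:Int) < r) by omega, show ¬((1:Int) < r) by omega,
      show ¬((2:Int) < r) by omega, show ¬((3:Int) < r) by omega,
      show ¬((4:Int) < r) by omega]
    decide
  · by_cases h5 : 5 ≤ r
    · have hn : max 0 (min 5 r) = 5 := by omega
      simp [render_stars, render_stars_alt, hR, hn,
        show (0:Int) < r by omega, show (1:Int) < r by omega,
        show (2:Int) < r by omega, show (3:Int) < r by omega,
        show (4:Int) < r by omega]
      decide
    · interval_cases r <;> decide

-- ===== VERDICT (by name: the statement is the Claim_ definition above) =====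
theorem render_stars_spec : Claim_equal_render_stars := by
  intro r _
  exact render_stars_eq_alt r
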